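-- pv_equiv track=rewrite | github.com/ivanmilevtues/python101 | lesson_3/tasks.py | message_to_numbers
-- ===== SOURCE A (Python) =====
-- alphabet_dict = {
--     "a": "2",
--     "b": "22",
--     "c": "222",
--     "d": "3",
--     "e": "33",
--     "f": "333",
--     "g": "4",
--     "h": "44",
--     "i": "444",
--     "j": "5",
--     "k": "55",
--     "l": "555",
--     "m": "6",
--     "n": "66",
--     "o": "666",
--     "p": "7",
--     "q": "77",
--     "r": "777",
--     "s": "7777",
--     "t": "8",
--     "u": "88",
--     "v": "888",
--     "w": "9",
--     "x": "99",
--     "y": "999",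
--     "z": "9999",
--     " ": "0"
-- }
--
-- def message_to_numbers(message):
--     result_list = []
--     last_digit_val = ''
--     for char in message:
--         for key in alphabet_dict:
--             if(char >= 'A' and char <= 'Z'):
--                 result_list.append(1)
--                 char = char.lower()
--             if char == key:
--                 if alphabet_dict[key][0] == last_digit_val:
--                     result_list.append(-1)
--                 for digit in alphabet_dict[key]:
--                     result_list.append(int(digit))
--                 last_digit_val = digit
--     return result_list
-- ===== SOURCE B (Python) =====
-- def _keycode(c):
--     # closed-form phone keypad: which digit and how many repeats, no table
--     if c == ' ':
--         return (0, 1)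
--     if 'a' <= c <= 'z':
--         if c == 's':
--             return (7, 4)
--         if c == 'z':
--             return (9, 4)
--         i = ord(c) - 97
--         if i >= 19:
--             i -= 1
--         return (2 + i // 3, i % 3 + 1)
--     return None
--
--
-- def message_to_numbers(message):
--     # phase 1: arithmetic codes (was_upper, digit, repeat) for the mapped characters
--     codes = []
--     for ch in message:
--         kc = _keycode(ch.lower())
--         if kc is not None:
--             codes.append(('A' <= ch <= 'Z', kc[0], kc[1]))
--     # phase 2: stateless emission over each code paired with its predecessor
--     out = []
--     for (up, d, k), prev in zip(codes, [None] + codes):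
--         out += [1] * up + [-1] * (prev is not None and prev[1] == d) + [d] * k
--     return out
-- ===== Notes on version B (the rewrite author's own statement) =====
-- stated objective: faster
-- what changed: A rescans all 27 dict keys for every character with the uppercase and -1 logic tangled into that inner scan; B has no table at all: an arithmetic closed form gives each letter its keypad (digit, repeat-count) code, and a stateless second pass flat-maps each code zipped with its predecessor into markers plus a replicated digit.
import Mathlib
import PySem

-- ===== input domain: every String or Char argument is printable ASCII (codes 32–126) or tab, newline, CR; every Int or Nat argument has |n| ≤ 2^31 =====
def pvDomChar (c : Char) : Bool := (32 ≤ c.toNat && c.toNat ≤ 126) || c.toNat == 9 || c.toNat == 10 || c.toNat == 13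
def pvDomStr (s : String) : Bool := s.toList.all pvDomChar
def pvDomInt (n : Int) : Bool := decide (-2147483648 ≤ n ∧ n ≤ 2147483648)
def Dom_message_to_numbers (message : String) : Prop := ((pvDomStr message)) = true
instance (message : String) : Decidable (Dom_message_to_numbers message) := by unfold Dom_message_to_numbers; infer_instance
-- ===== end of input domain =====

-- B drops A's per-character rescan of a 27-key dict entirely: a closed-form arithmetic keypad code
-- (digit, repeat-count) per letter, then a stateless emission over each code zipped with its predecessor.


-- ===== PORT A =====
-- alphabet_dict, in insertion order; values kept as the digit characters Python stores.
def pvAlphabet : List (Char × List Char) :=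
  [('a', ['2']), ('b', ['2','2']), ('c', ['2','2','2']),
   ('d', ['3']), ('e', ['3','3']), ('f', ['3','3','3']),
   ('g', ['4']), ('h', ['4','4']), ('i', ['4','4','4']),
   ('j', ['5']), ('k', ['5','5']), ('l', ['5','5','5']),
   ('m', ['6']), ('n', ['6','6']), ('o', ['6','6','6']),
   ('p', ['7']), ('q', ['7','7']), ('r', ['7','7','7']), ('s', ['7','7','7','7']),
   ('t', ['8']), ('u', ['8','8']), ('v', ['8','8','8']),
   ('w', ['9']), ('x', ['9','9']), ('y', ['9','9','9']), ('z', ['9','9','9','9']),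
   (' ', ['0'])]

-- int(d) for a single digit character d (exact for '0'..'9', the only characters it is applied to)
def pvDigitInt (c : Char) : Int := (c.toNat : Int) - 48

-- A's inner `for key in alphabet_dict` body; last_digit_val '' is modelled as `none`.
def pvInnerStep (st : List Int × Option Char × Char) (kv : Char × List Char) :
    List Int × Option Char × Char :=
  let res := st.1
  let last := st.2.1
  let ch := st.2.2
  let resCh := if PySem.Chars.isupper ch then (res ++ [1], PySem.Chars.lowerChar ch) else (res, ch)
  if resCh.2 = kv.1 then
    let res1 := if kv.2.head? = last then resCh.1 ++ [-1] else resCh.1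
    let res2 := res1 ++ kv.2.map pvDigitInt
    let last' := match kv.2.getLast? with | some d => some d | none => last
    (res2, last', resCh.2)
  else (resCh.1, last, resCh.2)

def message_to_numbers (message : String) : List Int :=
  (message.toList.foldl
    (fun (st : List Int × Option Char) ch =>
      let r := pvAlphabet.foldl pvInnerStep (st.1, st.2, ch)
      (r.1, r.2.1))
    ([], none)).1

-- ===== PORT B =====
-- closed-form keypad code of a lowercase character: (digit, repeat count), none if unmapped
-- (Source B's i // 3 and i % 3 act on non-negative ints, where Lean's Nat / and % coincide exactly)
def pvKeyCode (c : Char) : Option (Int × Nat) :=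
  if c = ' ' then some (0, 1)
  else if 'a' ≤ c ∧ c ≤ 'z' then
    if c = 's' then some (7, 4)
    else if c = 'z' then some (9, 4)
    else
      let i := c.toNat - 97
      let i2 := if 19 ≤ i then i - 1 else i
      some (2 + ((i2 / 3 : Nat) : Int), i2 % 3 + 1)
  else none

-- phase 1 per-character: (was_upper, digit, repeats) for mapped characters
def pvCodeOf (ch : Char) : Option (Bool × Int × Nat) :=
  (pvKeyCode (PySem.Chars.lowerChar ch)).map (fun dk => (PySem.Chars.isupper ch, dk.1, dk.2))

-- phase 2: output of one code given its predecessor code (none at the front)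
def pvEmit (g : (Bool × Int × Nat) × Option (Bool × Int × Nat)) : List Int :=
  (if g.1.1 then [1] else []) ++
  (if g.2.map (fun p => p.2.1) = some g.1.2.1 then [-1] else []) ++
  List.replicate g.1.2.2 g.1.2.1

def message_to_numbers_alt (message : String) : List Int :=
  let codes := message.toList.filterMap pvCodeOf
  (codes.zip (none :: codes.map some)).flatMap pvEmit

-- ===== PRECONDITION & SPEC =====
def Spec_message_to_numbers (message : String) (out : List Int) : Prop := out = message_to_numbers_alt message
instance (message : String) (out : List Int) : Decidable (Spec_message_to_numbers message out) := by unfold Spec_message_to_numbers; infer_instance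

-- ===== CLAIM (what is proved, stated in full; the proofs are below) =====
def Claim_equal_message_to_numbers : Prop := ∀ (message : String), Dom_message_to_numbers message → Spec_message_to_numbers message (message_to_numbers message)

-- ===== LEMMAS AND PROOFS =====

-- B's group list rendered in A's vocabulary: the digit as its character, repeated
def pvTr (c : Bool × Int × Nat) : Bool × List Char :=
  (c.1, List.replicate c.2.2 (Char.ofNat (48 + c.2.1.toNat)))

-- A's per-character group: first-match lookup after case handling (used only in the proofs)
def pvGroupOf (ch : Char) : Option (Bool × List Char) :=
  let up := PySem.Chars.isupper ch
  match List.lookup (if up then PySem.Chars.lowerChar ch else ch) pvAlphabet with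
  | some ds => some (up, ds)
  | none => none

-- A's outer-loop body restated over groups with state (result, last digit char)
def pvEmitStep (st : List Int × Option Char) (g : Bool × List Char) : List Int × Option Char :=
  (st.1 ++ (if g.1 then [1] else []) ++ (if g.2.head? = st.2 then [-1] else [])
        ++ g.2.map pvDigitInt,
   g.2.getLast?)

-- intermediate fold over B's codes carrying the last digit as an Int
def pvStepInt (st : List Int × Option Int) (c : Bool × Int × Nat) : List Int × Option Int :=
  (st.1 ++ (if c.1 then [1] else []) ++ (if st.2 = some c.2.1 then [-1] else [])
        ++ List.replicate c.2.2 c.2.1,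
   some c.2.1)

-- a non-uppercase character matching no key leaves the inner-loop state unchanged
theorem pvInner_id (keys : List (Char × List Char)) (res : List Int) (last : Option Char)
    (ch : Char) (hup : PySem.Chars.isupper ch = false) (hmem : ∀ kv ∈ keys, ch ≠ kv.1) :
    keys.foldl pvInnerStep (res, last, ch) = (res, last, ch) := by
  induction keys with
  | nil => rfl
  | cons kv t ih =>
      have h1 : ch ≠ kv.1 := hmem kv (by simp)
      simp only [List.foldl_cons, pvInnerStep, hup, Bool.false_eq_true, if_false, if_neg h1]
      exact ih (fun kv' h => hmem kv' (by simp [h]))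

-- the inner loop on a non-uppercase character is a first-match lookup
theorem pvInner_noup (keys : List (Char × List Char)) (res : List Int) (last : Option Char)
    (ch : Char) (hup : PySem.Chars.isupper ch = false)
    (hnd : (keys.map Prod.fst).Nodup) (hne : ∀ kv ∈ keys, kv.2 ≠ []) :
    keys.foldl pvInnerStep (res, last, ch) =
      match List.lookup ch keys with
      | none => (res, last, ch)
      | some ds => ((if ds.head? = last then res ++ [-1] else res) ++ ds.map pvDigitInt,
                    ds.getLast?, ch) := by
  induction keys generalizing res with
  | nil => rfl
  | cons kv t ih =>
      obtain ⟨k, v⟩ := kv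
      have hk : k ∉ t.map Prod.fst := by
        have h := hnd; simp only [List.map_cons, List.nodup_cons] at h; exact h.1
      by_cases h1 : ch = k
      · have hv : v ≠ [] := hne (k, v) (by simp)
        obtain ⟨d, hd⟩ : ∃ d, v.getLast? = some d := by
          cases hgl : v.getLast? with
          | none => exact absurd (List.getLast?_eq_none_iff.mp hgl) hv
          | some d => exact ⟨d, rfl⟩
        have hnot : ∀ kv' ∈ t, ch ≠ kv'.1 := by
          intro kv' hmem heq
          have hm : kv'.1 ∈ t.map Prod.fst := List.mem_map_of_mem hmem
          rw [← heq, h1] at hm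
          exact hk hm
        simp only [List.foldl_cons, pvInnerStep, hup, Bool.false_eq_true, if_false, if_pos h1,
          hd]
        rw [pvInner_id t _ _ ch hup hnot]
        simp [h1, hd]
      · simp only [List.foldl_cons, pvInnerStep, hup, Bool.false_eq_true, if_false, if_neg h1]
        rw [ih _ (by have h := hnd; simp only [List.map_cons, List.nodup_cons] at h; exact h.2)
              (fun kv' h => hne kv' (by simp [h]))]
        have hb : (ch == k) = false := by simp [h1]
        simp [List.lookup_cons, hb]

-- lowering an uppercase letter yields a non-uppercase character
theorem pvLower_noup (ch : Char) (h : PySem.Chars.isupper ch = true) :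
    PySem.Chars.isupper (PySem.Chars.lowerChar ch) = false := by
  simp only [PySem.Chars.isupper, Char.le_def, Bool.and_eq_true, decide_eq_true_eq] at h
  obtain ⟨h1, h2⟩ := h
  have h1' : 65 ≤ ch.toNat := h1
  have h2' : ch.toNat ≤ 90 := h2
  simp only [PySem.Chars.lowerChar, PySem.Chars.isupper, Char.le_def, h1, h2,
    decide_true, Bool.and_self, if_pos]
  obtain ⟨n, hn⟩ : ∃ n, ch.toNat = n := ⟨_, rfl⟩
  rw [hn] at h1' h2' ⊢
  interval_cases n <;> decide

-- the lowered form of an uppercase letter is always in the dict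
theorem pvLower_mem (ch : Char) (h : PySem.Chars.isupper ch = true) :
    (List.lookup (PySem.Chars.lowerChar ch) pvAlphabet).isSome := by
  simp only [PySem.Chars.isupper, Char.le_def, Bool.and_eq_true, decide_eq_true_eq] at h
  obtain ⟨h1, h2⟩ := h
  have h1' : 65 ≤ ch.toNat := h1
  have h2' : ch.toNat ≤ 90 := h2
  simp only [PySem.Chars.lowerChar, PySem.Chars.isupper, Char.le_def, h1, h2,
    decide_true, Bool.and_self, if_pos]
  obtain ⟨n, hn⟩ : ∃ n, ch.toNat = n := ⟨_, rfl⟩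
  rw [hn] at h1' h2' ⊢
  interval_cases n <;> decide

-- one character of A's outer loop is one pvGroupOf lookup + pvEmitStep
theorem pvChar_step (res : List Int) (last : Option Char) (ch : Char) :
    (((pvAlphabet.foldl pvInnerStep (res, last, ch)).1,
      (pvAlphabet.foldl pvInnerStep (res, last, ch)).2.1) : List Int × Option Char) =
      match pvGroupOf ch with
      | none => (res, last)
      | some g => pvEmitStep (res, last) g := by
  by_cases hup : PySem.Chars.isupper ch = true
  · have hlow := pvLower_noup ch hup
    have hstep : pvAlphabet.foldl pvInnerStep (res, last, ch) =
        pvAlphabet.foldl pvInnerStep (res ++ [1], last, PySem.Chars.lowerChar ch) := by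
      rw [show pvAlphabet = ('a', ['2']) :: pvAlphabet.tail from rfl]
      simp only [List.foldl_cons]
      congr 1
      simp only [pvInnerStep, hup, hlow, Bool.false_eq_true, if_true, if_false]
    rw [hstep, pvInner_noup _ _ _ _ hlow (by decide) (by decide)]
    obtain ⟨ds, hds⟩ := Option.isSome_iff_exists.mp (pvLower_mem ch hup)
    simp only [pvGroupOf, hup, if_pos, hds, pvEmitStep]
    split_ifs <;> simp_all
  · have hup' : PySem.Chars.isupper ch = false := by simpa using hup
    rw [pvInner_noup _ _ _ _ hup' (by decide) (by decide)]
    simp only [pvGroupOf, hup', Bool.false_eq_true, if_false]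
    cases hds : List.lookup ch pvAlphabet with
    | none => simp
    | some ds =>
        simp only [pvEmitStep]
        split_ifs <;> simp_all

-- the whole outer loop of A is a fold of pvEmitStep over the group list
theorem pvMain (L : List Char) (res : List Int) (last : Option Char) :
    L.foldl
      (fun (st : List Int × Option Char) ch =>
        let r := pvAlphabet.foldl pvInnerStep (st.1, st.2, ch)
        (r.1, r.2.1))
      (res, last) =
    (L.filterMap pvGroupOf).foldl pvEmitStep (res, last) := by
  induction L generalizing res last with
  | nil => rfl
  | cons ch t ih =>
      simp only [List.foldl_cons, List.filterMap_cons]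
      have h := pvChar_step res last ch
      cases hg : pvGroupOf ch with
      | none =>
          rw [hg] at h
          have h' : (((pvAlphabet.foldl pvInnerStep (res, last, ch)).1,
              (pvAlphabet.foldl pvInnerStep (res, last, ch)).2.1) : List Int × Option Char)
              = (res, last) := h
          rw [h']
          exact ih res last
      | some g =>
          rw [hg] at h
          have h' : (((pvAlphabet.foldl pvInnerStep (res, last, ch)).1,
              (pvAlphabet.foldl pvInnerStep (res, last, ch)).2.1) : List Int × Option Char)
              = pvEmitStep (res, last) g := h
          rw [h', List.foldl_cons]
          exact ih _ _

-- on a domain character A's group is exactly the rendering of B's arithmetic code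
theorem pvGroup_eq_code (ch : Char) (h : pvDomChar ch = true) :
    pvGroupOf ch = (pvCodeOf ch).map pvTr := by
  have hb : 9 ≤ ch.toNat ∧ ch.toNat ≤ 126 := by
    simp only [pvDomChar, Bool.or_eq_true, Bool.and_eq_true, decide_eq_true_eq,
      Nat.beq_eq_true_eq] at h
    omega
  have hch : Char.ofNat ch.toNat = ch := Char.ofNat_toNat ch
  obtain ⟨n, hn, hlo, hhi⟩ : ∃ n, ch = Char.ofNat n ∧ 9 ≤ n ∧ n ≤ 126 :=
    ⟨ch.toNat, hch.symm, hb.1, hb.2⟩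
  subst hn
  interval_cases n <;> decide

-- every code B produces on a domain character has a digit in 0..9 and a positive repeat count
theorem pvCode_range (ch : Char) (hd : pvDomChar ch = true) (c : Bool × Int × Nat)
    (h : pvCodeOf ch = some c) : 0 ≤ c.2.1 ∧ c.2.1 ≤ 9 ∧ 1 ≤ c.2.2 := by
  have hb : 9 ≤ ch.toNat ∧ ch.toNat ≤ 126 := by
    simp only [pvDomChar, Bool.or_eq_true, Bool.and_eq_true, decide_eq_true_eq,
      Nat.beq_eq_true_eq] at hd
    omega
  have hall : (pvCodeOf ch).all
      (fun c => decide (0 ≤ c.2.1 ∧ c.2.1 ≤ 9 ∧ 1 ≤ c.2.2)) = true := by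
    obtain ⟨n, hn, hlo, hhi⟩ : ∃ n, ch = Char.ofNat n ∧ 9 ≤ n ∧ n ≤ 126 :=
      ⟨ch.toNat, (Char.ofNat_toNat ch).symm, hb.1, hb.2⟩
    subst hn
    interval_cases n <;> decide
  rw [h] at hall
  simpa using hall

-- the digit character of a digit value, and back
theorem pvDigitInt_char (d : Int) (h0 : 0 ≤ d) (h9 : d ≤ 9) :
    pvDigitInt (Char.ofNat (48 + d.toNat)) = d := by
  interval_cases d <;> rfl

theorem pvDigitChar_inj (d q : Int) (hd : 0 ≤ d ∧ d ≤ 9) (hq : 0 ≤ q ∧ q ≤ 9) :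
    (Char.ofNat (48 + d.toNat) = Char.ofNat (48 + q.toNat)) ↔ q = d := by
  obtain ⟨hd0, hd9⟩ := hd; obtain ⟨hq0, hq9⟩ := hq
  interval_cases d <;> interval_cases q <;> decide

-- folding pvEmitStep over rendered codes is folding pvStepInt over the codes
theorem pvFold_tr (codes : List (Bool × Int × Nat))
    (hc : ∀ c ∈ codes, 0 ≤ c.2.1 ∧ c.2.1 ≤ 9 ∧ 1 ≤ c.2.2)
    (res : List Int) (p : Option Int) (hp : ∀ d, p = some d → 0 ≤ d ∧ d ≤ 9) :
    (codes.map pvTr).foldl pvEmitStep (res, p.map (fun d => Char.ofNat (48 + d.toNat))) =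
      ((codes.foldl pvStepInt (res, p)).1,
       (codes.foldl pvStepInt (res, p)).2.map (fun d => Char.ofNat (48 + d.toNat))) := by
  induction codes generalizing res p with
  | nil => simp
  | cons c t ih =>
      obtain ⟨⟨h0, h9, hk⟩⟩ : PLift (0 ≤ c.2.1 ∧ c.2.1 ≤ 9 ∧ 1 ≤ c.2.2) :=
        ⟨hc c (by simp)⟩
      obtain ⟨up, d, k⟩ := c
      have h0' : 0 ≤ d := h0
      have h9' : d ≤ 9 := h9
      have hk' : 1 ≤ k := hk
      obtain ⟨k', rfl⟩ : ∃ k', k = k' + 1 := ⟨k - 1, by omega⟩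
      simp only [List.map_cons, List.foldl_cons]
      have hif : (if some (Char.ofNat (48 + d.toNat)) =
            Option.map (fun d => Char.ofNat (48 + d.toNat)) p then ([-1] : List Int) else []) =
          (if p = some d then [-1] else []) := by
        rcases p with _ | q
        · simp
        · simp only [Option.map_some, Option.some.injEq]
          simp only [pvDigitChar_inj d q ⟨h0', h9'⟩ (hp q rfl)]
      have hstep : pvEmitStep (res, p.map (fun d => Char.ofNat (48 + d.toNat))) (pvTr (up, d, k' + 1)) =
          ((pvStepInt (res, p) (up, d, k' + 1)).1,
           (some d).map (fun d => Char.ofNat (48 + d.toNat))) := by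
        simp only [pvEmitStep, pvStepInt, pvTr, List.head?_replicate, List.getLast?_replicate,
          List.map_replicate, Option.map_some, Nat.succ_ne_zero, if_false]
        rw [pvDigitInt_char d h0' h9', hif]
        rfl

      rw [hstep]
      exact ih (fun c hm => hc c (by simp [hm])) _ (some d)
        (fun q hq => by cases hq; exact ⟨h0', h9'⟩)

-- a pvStepInt fold is the flatMap of pvEmit over codes zipped with their predecessors
theorem pvFold_zip (codes : List (Bool × Int × Nat)) (res : List Int)
    (p : Option (Bool × Int × Nat)) :
    (codes.foldl pvStepInt (res, p.map (fun c => c.2.1))).1 =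
      res ++ (codes.zip (p :: codes.map some)).flatMap pvEmit := by
  induction codes generalizing res p with
  | nil => simp
  | cons c t ih =>
      simp only [List.foldl_cons, List.map_cons, List.zip_cons_cons, List.flatMap_cons]
      have hstep : pvStepInt (res, p.map (fun c => c.2.1)) c =
          (res ++ pvEmit (c, p), (some c).map (fun c => c.2.1)) := by
        simp only [pvStepInt, pvEmit, Option.map_some, List.append_assoc]
      rw [hstep, ih]
      simp

-- on a domain string, A's group list is the rendering of B's code list
theorem pvFilterMap_tr (L : List Char) (h : ∀ ch ∈ L, pvDomChar ch = true) :
    L.filterMap pvGroupOf = (L.filterMap pvCodeOf).map pvTr := by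
  induction L with
  | nil => rfl
  | cons ch t ih =>
      simp only [List.filterMap_cons]
      rw [pvGroup_eq_code ch (h ch (by simp))]
      cases pvCodeOf ch with
      | none => exact ih (fun c hm => h c (by simp [hm]))
      | some c =>
          simp only [Option.map_some, List.map_cons]
          rw [ih (fun c hm => h c (by simp [hm]))]

-- ===== VERDICT (by name: the statement is the Claim_ definition above) =====
theorem message_to_numbers_spec : Claim_equal_message_to_numbers := by
  intro message hdom
  unfold Spec_message_to_numbers message_to_numbers message_to_numbers_alt
  rw [pvMain]
  have hall : ∀ ch ∈ message.toList, pvDomChar ch = true := by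
    simpa [Dom_message_to_numbers, pvDomStr, List.all_eq_true] using hdom
  rw [pvFilterMap_tr _ hall]
  have h1 := pvFold_tr (message.toList.filterMap pvCodeOf)
    (fun c hm => by
      obtain ⟨ch, hch, hc⟩ := List.mem_filterMap.mp hm
      exact pvCode_range ch (hall ch hch) c hc)
    [] none (by simp)
  simp only [Option.map_none] at h1
  rw [h1]
  have h2 := pvFold_zip (message.toList.filterMap pvCodeOf) [] none
  simp only [Option.map_none, List.nil_append] at h2
  exact h2
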